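-- pv_equiv track=rewrite | github.com/MinaPecheux/Advent-Of-Code | 2016/Python/day2.py | compute_special_panel
-- ===== SOURCE A (Python) =====
-- def compute_special_panel(inputs):
--     '''Computes the bathroom code from the list of moves.
--
--     :param inputs: List of moves to make.
--     :type inputs: list(str)
--     :return: Bathroom code.
--     :rtype: str
--     '''
--     panel = [ [None, None, '1', None, None],
--               [None,  '2', '3',  '4', None],
--               [ '5',  '6', '7',  '8',  '9'],
--               [None,  'A', 'B',  'C', None],
--               [None, None, 'D', None, None] ]
--     W, H = 5, 5
--     code = ''
--     x, y = 0, 2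
--     for line in inputs:
--         for move in line:
--             new_x, new_y = x, y
--             if move == 'U':
--                 new_y -= 1
--             elif move == 'D':
--                 new_y += 1
--             elif move == 'L':
--                 new_x -= 1
--             elif move == 'R':
--                 new_x += 1
--             if new_x < 0 or new_x >= W or new_y < 0 or new_y >= H \
--                 or panel[new_y][new_x] is None:
--                 continue
--             x, y = new_x, new_y
--         code += panel[y][x]
--     return code
-- ===== SOURCE B (Python) =====
-- # Precomputed adjacency table: for each key, the key reached by each legal move.
-- NEIGHBORS = {
--     '1': {'D': '3'},
--     '2': {'R': '3', 'D': '6'},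
--     '3': {'U': '1', 'L': '2', 'R': '4', 'D': '7'},
--     '4': {'L': '3', 'D': '8'},
--     '5': {'R': '6'},
--     '6': {'U': '2', 'L': '5', 'R': '7', 'D': 'A'},
--     '7': {'U': '3', 'L': '6', 'R': '8', 'D': 'B'},
--     '8': {'U': '4', 'L': '7', 'R': '9', 'D': 'C'},
--     '9': {'L': '8'},
--     'A': {'U': '6', 'R': 'B'},
--     'B': {'U': '7', 'L': 'A', 'R': 'C', 'D': 'D'},
--     'C': {'U': '8', 'L': 'B'},
--     'D': {'U': 'B'},
-- }
--
-- def compute_special_panel(inputs):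
--     '''Computes the bathroom code from the list of moves (adjacency-table version).'''
--     cur = '5'
--     code = ''
--     for line in inputs:
--         for move in line:
--             cur = NEIGHBORS[cur].get(move, cur)
--         code += cur
--     return code
-- ===== Notes on version B (the rewrite author's own statement) =====
-- stated objective: idiomatic
-- what changed: Replaces the 2D grid with (x,y) coordinates and bounds/None checks by a precomputed adjacency dict keyed by the current key, so the only state is the current key and each move is a single dict .get with the current key as default.
import Mathlib
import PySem

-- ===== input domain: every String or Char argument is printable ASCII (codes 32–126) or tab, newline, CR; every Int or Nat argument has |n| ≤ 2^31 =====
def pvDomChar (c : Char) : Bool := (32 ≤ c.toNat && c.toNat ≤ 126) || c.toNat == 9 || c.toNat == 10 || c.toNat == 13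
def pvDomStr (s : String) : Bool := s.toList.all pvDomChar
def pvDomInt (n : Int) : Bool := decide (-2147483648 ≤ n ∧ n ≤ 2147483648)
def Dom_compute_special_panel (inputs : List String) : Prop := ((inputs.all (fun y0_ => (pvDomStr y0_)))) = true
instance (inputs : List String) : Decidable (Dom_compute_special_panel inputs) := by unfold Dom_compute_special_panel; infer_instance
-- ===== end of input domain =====

-- B replaces the 2D grid + (x,y) coordinate simulation by a precomputed adjacency dict keyed by
-- the current key, keeping only the current key as state (idiomatic; same asymptotic cost).

-- ===== PORT A =====
def pvPanel : List (List (Option String)) :=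
  [ [none, none, some "1", none, none],
    [none, some "2", some "3", some "4", none],
    [some "5", some "6", some "7", some "8", some "9"],
    [none, some "A", some "B", some "C", none],
    [none, none, some "D", none, none] ]

-- panel[y][x]; indices are always in range when this is used (A checks bounds first)
def pvCellA (xy : Int × Int) : Option String :=
  (PySem.List.pyGet? ((PySem.List.pyGet? pvPanel xy.2).getD []) xy.1).getD none

-- the body of A's inner loop over one move character (W = H = 5)
def pvStepA (xy : Int × Int) (move : Char) : Int × Int :=
  let nxy : Int × Int :=
    if move = 'U' then (xy.1, xy.2 - 1)
    else if move = 'D' then (xy.1, xy.2 + 1)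
    else if move = 'L' then (xy.1 - 1, xy.2)
    else if move = 'R' then (xy.1 + 1, xy.2)
    else xy
  if nxy.1 < 0 ∨ 5 ≤ nxy.1 ∨ nxy.2 < 0 ∨ 5 ≤ nxy.2 ∨ pvCellA nxy = none
  then xy else nxy

-- the body of A's outer loop: run the line's moves, then code += panel[y][x]
-- (panel[y][x] is never None at this point — the position invariant; .getD "" is unreachable)
def pvLineA (st : (Int × Int) × String) (line : String) : (Int × Int) × String :=
  let xy := line.toList.foldl pvStepA st.1
  (xy, st.2 ++ (pvCellA xy).getD "")

def compute_special_panel (inputs : List String) : String :=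
  (inputs.foldl pvLineA ((0, 2), "")).2

-- ===== PORT B =====
def pvNeighbors : PySem.Dict String (PySem.Dict Char String) :=
  PySem.Dict.ofList
    [ ("1", PySem.Dict.ofList [('D', "3")]),
      ("2", PySem.Dict.ofList [('R', "3"), ('D', "6")]),
      ("3", PySem.Dict.ofList [('U', "1"), ('L', "2"), ('R', "4"), ('D', "7")]),
      ("4", PySem.Dict.ofList [('L', "3"), ('D', "8")]),
      ("5", PySem.Dict.ofList [('R', "6")]),
      ("6", PySem.Dict.ofList [('U', "2"), ('L', "5"), ('R', "7"), ('D', "A")]),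
      ("7", PySem.Dict.ofList [('U', "3"), ('L', "6"), ('R', "8"), ('D', "B")]),
      ("8", PySem.Dict.ofList [('U', "4"), ('L', "7"), ('R', "9"), ('D', "C")]),
      ("9", PySem.Dict.ofList [('L', "8")]),
      ("A", PySem.Dict.ofList [('U', "6"), ('R', "B")]),
      ("B", PySem.Dict.ofList [('U', "7"), ('L', "A"), ('R', "C"), ('D', "D")]),
      ("C", PySem.Dict.ofList [('U', "8"), ('L', "B")]),
      ("D", PySem.Dict.ofList [('U', "B")]) ]

-- NEIGHBORS[cur].get(move, cur); cur is always a key of NEIGHBORS, so the outer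
-- .getD Dict.empty (Python: KeyError) is unreachable
def pvStepB (cur : String) (move : Char) : String :=
  (((pvNeighbors.get? cur).getD PySem.Dict.empty).get? move).getD cur

def pvLineB (st : String × String) (line : String) : String × String :=
  let cur := line.toList.foldl pvStepB st.1
  (cur, st.2 ++ cur)

def compute_special_panel_alt (inputs : List String) : String :=
  (inputs.foldl pvLineB ("5", "")).2

-- ===== PRECONDITION & SPEC =====
def Spec_compute_special_panel (inputs : List String) (out : String) : Prop := out = compute_special_panel_alt inputs
instance (inputs : List String) (out : String) : Decidable (Spec_compute_special_panel inputs out) := by unfold Spec_compute_special_panel; infer_instance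

-- ===== CLAIM (what is proved, stated in full; the proofs are below) =====
def Claim_equal_compute_special_panel : Prop := ∀ (inputs : List String), Dom_compute_special_panel inputs → Spec_compute_special_panel inputs (compute_special_panel inputs)

-- ===== LEMMAS AND PROOFS =====

-- the 13 legal positions of A paired with the key B holds there
def pvTable : List ((Int × Int) × String) :=
  [ ((2, 0), "1"),
    ((1, 1), "2"), ((2, 1), "3"), ((3, 1), "4"),
    ((0, 2), "5"), ((1, 2), "6"), ((2, 2), "7"), ((3, 2), "8"), ((4, 2), "9"),
    ((1, 3), "A"), ((2, 3), "B"), ((3, 3), "C"),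
    ((2, 4), "D") ]

lemma pvCell_table : ∀ pr ∈ pvTable, pvCellA pr.1 = some pr.2 := by decide

lemma pvFindMove_none (c : Char) (hU : c ≠ 'U') (hD : c ≠ 'D') (hL : c ≠ 'L') (hR : c ≠ 'R')
    (l : List (Char × String)) (hk : ∀ p ∈ l, p.1 = 'U' ∨ p.1 = 'D' ∨ p.1 = 'L' ∨ p.1 = 'R') :
    l.find? (fun p => p.1 == c) = none := by
  rw [List.find?_eq_none]
  intro x hx
  rcases hk x hx with h | h | h | h <;> simp [h, Ne.symm hU, Ne.symm hD, Ne.symm hL, Ne.symm hR]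

lemma pvStepB_other (s : String) (c : Char) (hU : c ≠ 'U') (hD : c ≠ 'D') (hL : c ≠ 'L') (hR : c ≠ 'R')
    (hk : ∀ p ∈ ((pvNeighbors.get? s).getD PySem.Dict.empty).items,
      p.1 = 'U' ∨ p.1 = 'D' ∨ p.1 = 'L' ∨ p.1 = 'R') : pvStepB s c = s := by
  have h := pvFindMove_none c hU hD hL hR _ hk
  simp only [PySem.Dict.get?] at h
  simp [pvStepB, PySem.Dict.get?, h]

lemma pvStep_other : ∀ pr ∈ pvTable, ∀ c : Char,
    c ≠ 'U' → c ≠ 'D' → c ≠ 'L' → c ≠ 'R' →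
    pvStepA pr.1 c = pr.1 ∧ pvStepB pr.2 c = pr.2 := by
  intro pr hmem c hU hD hL hR
  fin_cases hmem <;>
    exact ⟨by simp [pvStepA, pvCellA, pvPanel, PySem.List.pyGet?, hU, hD, hL, hR],
           pvStepB_other _ _ hU hD hL hR (by decide)⟩

lemma pvStep_agree : ∀ pr ∈ pvTable, ∀ c : Char,
    (pvStepA pr.1 c, pvStepB pr.2 c) ∈ pvTable := by
  intro pr hmem c
  by_cases hU : c = 'U'
  · subst hU; revert pr hmem; decide
  by_cases hD : c = 'D'
  · subst hD; revert pr hmem; decide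
  by_cases hL : c = 'L'
  · subst hL; revert pr hmem; decide
  by_cases hR : c = 'R'
  · subst hR; revert pr hmem; decide
  obtain ⟨h1, h2⟩ := pvStep_other pr hmem c hU hD hL hR
  rw [h1, h2]; exact hmem

lemma pvFold_agree : ∀ (cs : List Char) (p : Int × Int) (s : String),
    (p, s) ∈ pvTable → (cs.foldl pvStepA p, cs.foldl pvStepB s) ∈ pvTable := by
  intro cs
  induction cs with
  | nil => intro p s h; exact h
  | cons c cs ih =>
    intro p s h
    exact ih _ _ (pvStep_agree (p, s) h c)

lemma pvLoop_agree : ∀ (lines : List String) (p : Int × Int) (s code : String),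
    (p, s) ∈ pvTable →
    (lines.foldl pvLineA (p, code)).2 = (lines.foldl pvLineB (s, code)).2 := by
  intro lines
  induction lines with
  | nil => intro p s code _; rfl
  | cons line rest ih =>
    intro p s code h
    have hmem := pvFold_agree line.toList p s h
    have hcell := pvCell_table _ hmem
    simp only [List.foldl_cons, pvLineA, pvLineB, hcell, Option.getD_some]
    exact ih _ _ _ hmem

-- ===== VERDICT (by name: the statement is the Claim_ definition above) =====
theorem compute_special_panel_spec : Claim_equal_compute_special_panel := by
  intro inputs _
  show compute_special_panel inputs = compute_special_panel_alt inputs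
  exact pvLoop_agree inputs (0, 2) "5" "" (by decide)
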